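-- pv_equiv track=rewrite | github.com/Eyalz111/Gianluigi-Cropsight | processors/proactive_alerts.py | format_alerts_message
-- ===== SOURCE A (Python) =====
-- def format_alerts_message(alerts: list[dict]) -> str:
--     """
--     Format alerts into a Telegram-friendly message.
--
--     Groups alerts by severity level.
--
--     Args:
--         alerts: List of alert dicts.
--
--     Returns:
--         Formatted message string.
--     """
--     if not alerts:
--         return ""
--
--     # Sort: high first, then medium, then low
--     severity_order = {"high": 0, "medium": 1, "low": 2}
--     sorted_alerts = sorted(alerts, key=lambda a: severity_order.get(a.get("severity", "low"), 2))
--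
--     lines = ["<b>Heads up</b>\n"]
--     for a in sorted_alerts:
--         severity = a.get("severity", "low")
--         title = a.get("title", "")
--         details = a.get("details", "")
--         if severity == "high":
--             detail_str = f" — {details[:100]}" if details else ""
--             lines.append(f"🔴 {title}{detail_str}")
--         elif severity == "medium":
--             detail_str = f" — {details[:100]}" if details else ""
--             lines.append(f"🟡 {title}{detail_str}")
--         else:
--             lines.append(title)
--
--     return "\n".join(lines)
-- ===== SOURCE B (Python) =====
-- def format_alerts_message(alerts: list[dict]) -> str:
--     """Bucket alerts by severity in one pass (no sort) and join the three buckets in order."""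
--     if not alerts:
--         return ""
--     high, medium, low = [], [], []
--     for a in alerts:
--         severity = a.get("severity", "low")
--         title = a.get("title", "")
--         details = a.get("details", "")
--         if severity == "high":
--             high.append("🔴 " + title + (" — " + details[:100] if details else ""))
--         elif severity == "medium":
--             medium.append("🟡 " + title + (" — " + details[:100] if details else ""))
--         else:
--             low.append(title)
--     return "\n".join(["<b>Heads up</b>\n"] + high + medium + low)
-- ===== Notes on version B (the rewrite author's own statement) =====
-- stated objective: alternative
-- what changed: Replaces A's sort-by-severity-then-format pass with a single pass that appends each formatted line into one of three severity buckets and concatenates them, relying on the stability of Python's sort for equivalence.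
import Mathlib
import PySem

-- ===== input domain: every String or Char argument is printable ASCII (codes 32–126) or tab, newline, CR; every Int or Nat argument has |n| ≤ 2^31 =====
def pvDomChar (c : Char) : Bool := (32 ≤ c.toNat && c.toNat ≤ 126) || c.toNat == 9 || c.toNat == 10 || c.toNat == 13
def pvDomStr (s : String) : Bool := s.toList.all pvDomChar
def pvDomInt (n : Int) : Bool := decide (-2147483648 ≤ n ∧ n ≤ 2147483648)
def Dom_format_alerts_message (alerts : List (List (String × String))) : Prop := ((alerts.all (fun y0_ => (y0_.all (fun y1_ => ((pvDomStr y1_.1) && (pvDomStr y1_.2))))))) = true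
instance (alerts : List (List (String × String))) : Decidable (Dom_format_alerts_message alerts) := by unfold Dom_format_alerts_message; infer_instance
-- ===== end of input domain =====

-- B replaces A's sort by severity with a single bucketing pass into three severity buckets (alternative algorithm; equivalence rests on sort stability).

-- ===== PORT A =====
-- a.get(k, dflt) on the alert dict (assoc list, first match)
def pyGet (a : List (String × String)) (k dflt : String) : String :=
  ((PySem.Dict.mk a).get? k).getD dflt

def format_alerts_message (alerts : List (List (String × String))) : String :=
  if alerts = [] then ""
  else
    let severity_order : PySem.Dict String Int := PySem.Dict.ofList [("high", 0), ("medium", 1), ("low", 2)]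
    let sorted_alerts := PySem.List.sorted alerts (fun a => severity_order.getD (pyGet a "severity" "low") 2)
    let lines := sorted_alerts.foldl (fun lines a =>
      let severity := pyGet a "severity" "low"
      let title := pyGet a "title" ""
      let details := pyGet a "details" ""
      if severity = "high" then
        let detail_str := if details = "" then "" else " — " ++ PySem.Str.slice details none (some 100)
        lines ++ ["🔴 " ++ title ++ detail_str]
      else if severity = "medium" then
        let detail_str := if details = "" then "" else " — " ++ PySem.Str.slice details none (some 100)
        lines ++ ["🟡 " ++ title ++ detail_str]
      else
        lines ++ [title]) ["<b>Heads up</b>\n"]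
    PySem.Str.join "\n" lines

-- ===== PORT B =====
def format_alerts_message_alt (alerts : List (List (String × String))) : String :=
  if alerts = [] then ""
  else
    let t := alerts.foldl (fun (t : List String × List String × List String) a =>
      let severity := pyGet a "severity" "low"
      let title := pyGet a "title" ""
      let details := pyGet a "details" ""
      if severity = "high" then
        (t.1 ++ ["🔴 " ++ title ++ (if details = "" then "" else " — " ++ PySem.Str.slice details none (some 100))], t.2.1, t.2.2)
      else if severity = "medium" then
        (t.1, t.2.1 ++ ["🟡 " ++ title ++ (if details = "" then "" else " — " ++ PySem.Str.slice details none (some 100))], t.2.2)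
      else
        (t.1, t.2.1, t.2.2 ++ [title])) ([], [], [])
    PySem.Str.join "\n" (["<b>Heads up</b>\n"] ++ t.1 ++ t.2.1 ++ t.2.2)

-- ===== PRECONDITION & SPEC =====
def Spec_format_alerts_message (alerts : List (List (String × String))) (out : String) : Prop := out = format_alerts_message_alt alerts
instance (alerts : List (List (String × String))) (out : String) : Decidable (Spec_format_alerts_message alerts out) := by unfold Spec_format_alerts_message; infer_instance

-- ===== CLAIM (what is proved, stated in full; the proofs are below) =====
def Claim_equal_format_alerts_message : Prop := ∀ (alerts : List (List (String × String))), Dom_format_alerts_message alerts → Spec_format_alerts_message alerts (format_alerts_message alerts)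

-- ===== LEMMAS AND PROOFS =====

-- the severity string and A's sort key
def pvSev (a : List (String × String)) : String := pyGet a "severity" "low"
def pvKey (a : List (String × String)) : Int :=
  (PySem.Dict.ofList [("high", (0:Int)), ("medium", 1), ("low", 2)]).getD (pvSev a) 2

lemma pvKey_eq (a : List (String × String)) :
    pvKey a = if pvSev a = "high" then 0 else if pvSev a = "medium" then 1 else 2 := by
  have hd : (PySem.Dict.ofList [("high", (0:Int)), ("medium", 1), ("low", 2)]) = PySem.Dict.mk [("high", 0), ("medium", 1), ("low", 2)] := by decide
  rw [pvKey, hd]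
  by_cases h1 : pvSev a = "high"
  · simp [PySem.Dict.getD, PySem.Dict.get?_mk_cons, h1]
  by_cases h2 : pvSev a = "medium"
  · simp [PySem.Dict.getD, PySem.Dict.get?_mk_cons, h2]
  by_cases h3 : "low" = pvSev a
  · simp [PySem.Dict.getD, PySem.Dict.get?_mk_cons, Ne.symm h1, Ne.symm h2, h3, h1, h2]
  · simp [PySem.Dict.getD, PySem.Dict.get?, Ne.symm h1, Ne.symm h2, h3, h1, h2]

-- the formatted line of one alert
def pvLine (a : List (String × String)) : String :=
  if pvSev a = "high" then
    "🔴 " ++ pyGet a "title" "" ++ (if pyGet a "details" "" = "" then "" else " — " ++ PySem.Str.slice (pyGet a "details" "") none (some 100))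
  else if pvSev a = "medium" then
    "🟡 " ++ pyGet a "title" "" ++ (if pyGet a "details" "" = "" then "" else " — " ++ PySem.Str.slice (pyGet a "details" "") none (some 100))
  else pyGet a "title" ""

lemma insertBy_prefix {α : Type} (before : α → α → Bool) (x : α) (l1 l2 : List α)
    (h : ∀ y ∈ l1, before x y = false) :
    PySem.List.insertBy before x (l1 ++ l2) = l1 ++ PySem.List.insertBy before x l2 := by
  induction l1 with
  | nil => simp
  | cons y ys ih =>
    simp only [List.cons_append, PySem.List.insertBy]
    rw [h y (by simp)]
    simp [ih (fun z hz => h z (by simp [hz]))]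

lemma insertBy_all_before {α : Type} (before : α → α → Bool) (x : α) (l : List α)
    (h : ∀ y ∈ l, before x y = true) :
    PySem.List.insertBy before x l = x :: l := by
  cases l with
  | nil => rfl
  | cons y ys => simp [PySem.List.insertBy, h y (by simp)]

-- stability: a stable sort by a 3-valued key is the concatenation of the three buckets
lemma sorted_three {α : Type} (key : α → Int) (xs : List α)
    (h : ∀ x ∈ xs, key x = 0 ∨ key x = 1 ∨ key x = 2) :
    PySem.List.sorted xs key =
      xs.filter (fun x => key x == 0) ++ xs.filter (fun x => key x == 1) ++ xs.filter (fun x => key x == 2) := by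
  induction xs using List.reverseRecOn with
  | nil => simp [PySem.List.sorted_eq_foldl_insertBy]
  | append_singleton xs x ih =>
    have hx := h x (by simp)
    have hxs : ∀ y ∈ xs, key y = 0 ∨ key y = 1 ∨ key y = 2 := fun y hy => h y (by simp [hy])
    rw [PySem.List.sorted_eq_foldl_insertBy, List.foldl_append, ← PySem.List.sorted_eq_foldl_insertBy,
      ih hxs]
    simp only [List.foldl_cons, List.foldl_nil]
    have m0 : ∀ y ∈ xs.filter (fun x => key x == 0), key y = 0 := by
      intro y hy; simpa using (List.mem_filter.mp hy).2
    have m1 : ∀ y ∈ xs.filter (fun x => key x == 1), key y = 1 := by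
      intro y hy; simpa using (List.mem_filter.mp hy).2
    have m2 : ∀ y ∈ xs.filter (fun x => key x == 2), key y = 2 := by
      intro y hy; simpa using (List.mem_filter.mp hy).2
    rcases hx with hx | hx | hx
    · rw [List.append_assoc, insertBy_prefix _ _ _ _ (by intro y hy; simp [m0 y hy, hx]),
        insertBy_all_before _ _ _ (by
          intro y hy; rcases List.mem_append.mp hy with hy | hy
          · simp [m1 y hy, hx]
          · simp [m2 y hy, hx])]
      simp [List.filter_append, hx]
    · rw [insertBy_prefix _ _ _ _ (by
          intro y hy; rcases List.mem_append.mp hy with hy | hy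
          · simp [m0 y hy, hx]
          · simp [m1 y hy, hx]),
        insertBy_all_before _ _ _ (by intro y hy; simp [m2 y hy, hx])]
      simp [List.filter_append, hx]
    · rw [PySem.List.insertBy_of_forall_not_before _ _ _ (by
          intro y hy
          rcases List.mem_append.mp hy with hy | hy
          · rcases List.mem_append.mp hy with hy | hy
            · simp [m0 y hy, hx]
            · simp [m1 y hy, hx]
          · simp [m2 y hy, hx])]
      simp [List.filter_append, hx]

-- A's loop appends pvLine of each alert
lemma foldA (l : List (List (String × String))) (init : List String) :
    l.foldl (fun lines a =>
      let severity := pyGet a "severity" "low"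
      let title := pyGet a "title" ""
      let details := pyGet a "details" ""
      if severity = "high" then
        let detail_str := if details = "" then "" else " — " ++ PySem.Str.slice details none (some 100)
        lines ++ ["🔴 " ++ title ++ detail_str]
      else if severity = "medium" then
        let detail_str := if details = "" then "" else " — " ++ PySem.Str.slice details none (some 100)
        lines ++ ["🟡 " ++ title ++ detail_str]
      else
        lines ++ [title]) init = init ++ l.map pvLine := by
  rw [← PySem.List.foldl_append_singleton_eq_map (f := pvLine)]
  apply PySem.List.foldl_congr_mem
  intro acc a _
  simp only [pvLine, pvSev]
  split_ifs <;> rfl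

def pvIsH (a : List (String × String)) : Bool := pvSev a == "high"
def pvIsM (a : List (String × String)) : Bool := !(pvSev a == "high") && (pvSev a == "medium")
def pvIsL (a : List (String × String)) : Bool := !(pvSev a == "high") && !(pvSev a == "medium")

-- B's loop fills the three buckets
lemma foldB (l : List (List (String × String))) (t : List String × List String × List String) :
    l.foldl (fun (t : List String × List String × List String) a =>
      let severity := pyGet a "severity" "low"
      let title := pyGet a "title" ""
      let details := pyGet a "details" ""
      if severity = "high" then
        (t.1 ++ ["🔴 " ++ title ++ (if details = "" then "" else " — " ++ PySem.Str.slice details none (some 100))], t.2.1, t.2.2)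
      else if severity = "medium" then
        (t.1, t.2.1 ++ ["🟡 " ++ title ++ (if details = "" then "" else " — " ++ PySem.Str.slice details none (some 100))], t.2.2)
      else
        (t.1, t.2.1, t.2.2 ++ [title])) t
    = (t.1 ++ (l.filter pvIsH).map pvLine,
       t.2.1 ++ (l.filter pvIsM).map pvLine,
       t.2.2 ++ (l.filter pvIsL).map pvLine) := by
  induction l generalizing t with
  | nil => simp
  | cons a l ih =>
    by_cases h1 : pyGet a "severity" "low" = "high"
    · simp [List.foldl_cons, h1, ih, pvIsH, pvIsM, pvIsL, pvSev, pvLine]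
    by_cases h2 : pyGet a "severity" "low" = "medium"
    · simp [List.foldl_cons, h2, ih, pvIsH, pvIsM, pvIsL, pvSev, pvLine]
    · simp [List.foldl_cons, h1, h2, ih, pvIsH, pvIsM, pvIsL, pvSev, pvLine]

theorem pv_main : ∀ (alerts : List (List (String × String))),
    format_alerts_message alerts = format_alerts_message_alt alerts := by
  intro alerts
  unfold format_alerts_message format_alerts_message_alt
  by_cases hnil : alerts = []
  · simp [hnil]
  simp only [hnil, if_false]
  rw [foldA, foldB]
  have hkey : (fun a => (PySem.Dict.ofList [("high", (0:Int)), ("medium", 1), ("low", 2)]).getD (pyGet a "severity" "low") 2) = pvKey := by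
    funext a; rfl
  rw [hkey, sorted_three pvKey alerts (by
    intro x _
    rw [pvKey_eq]
    split_ifs <;> simp)]
  congr 1
  have f0 : alerts.filter (fun x => pvKey x == 0) = alerts.filter pvIsH := by
    apply List.filter_congr
    intro x _
    rw [pvKey_eq]
    simp only [pvIsH]
    split_ifs <;> simp_all
  have f1 : alerts.filter (fun x => pvKey x == 1) = alerts.filter pvIsM := by
    apply List.filter_congr
    intro x _
    rw [pvKey_eq]
    simp only [pvIsM]
    split_ifs <;> simp_all
  have f2 : alerts.filter (fun x => pvKey x == 2) = alerts.filter pvIsL := by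
    apply List.filter_congr
    intro x _
    rw [pvKey_eq]
    simp only [pvIsL]
    split_ifs <;> simp_all
  have hlast : ∀ a ∈ alerts.filter pvIsL, pvLine a = pyGet a "title" "" := by
    intro a ha
    have := (List.mem_filter.mp ha).2
    simp [pvIsL] at this
    simp [pvLine, this.1, this.2]
  rw [List.map_append, List.map_append, f0, f1, f2, List.map_congr_left hlast]
  simp

-- ===== VERDICT (by name: the statement is the Claim_ definition above) =====
theorem format_alerts_message_spec : Claim_equal_format_alerts_message := by
  intro alerts _
  unfold Spec_format_alerts_message
  exact pv_main alerts
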